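-- pv_equiv track=rewrite | github.com/rwgk/rwgk_config | bin/ctk_versions_list.py | extract_most_recent_minors_only
-- ===== SOURCE A (Python) =====
-- def version_key(ver: str) -> tuple[int, ...]:
--     return tuple(int(x) for x in ver.split("."))
--
-- def extract_most_recent_minors_only(
--     results: list[tuple[str, str]],
-- ) -> list[tuple[str, str]]:
--     latest: dict[str, tuple[str, str]] = {}
--     for ver, date in results:
--         parts = ver.split(".")
--         key = ".".join(parts[:2])  # major.minor
--         if key not in latest or version_key(ver) > version_key(latest[key][0]):
--             latest[key] = (ver, date)
--     # preserve original order of first appearance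
--     ordered: list[tuple[str, str]] = []
--     seen: set[str] = set()
--     for ver, date in results:
--         key = ".".join(ver.split(".")[:2])
--         if key not in seen:
--             seen.add(key)
--             ordered.append(latest[key])
--     return ordered
-- ===== SOURCE B (Python) =====
-- def version_key(ver: str) -> tuple[int, ...]:
--     return tuple(int(x) for x in ver.split("."))
--
-- def extract_most_recent_minors_only(
--     results: list[tuple[str, str]],
-- ) -> list[tuple[str, str]]:
--     # Group entries by major.minor (dict preserves first-appearance order),
--     # then reduce each group to its highest version.
--     groups: dict[str, list[tuple[str, str]]] = {}
--     for ver, date in results: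
--         groups.setdefault(".".join(ver.split(".")[:2]), []).append((ver, date))
--     out: list[tuple[str, str]] = []
--     for entries in groups.values():
--         best = entries[0]
--         for cand in entries[1:]:
--             if version_key(cand[0]) > version_key(best[0]):
--                 best = cand
--         out.append(best)
--     return out
-- ===== Notes on version B (the rewrite author's own statement) =====
-- stated objective: alternative
-- what changed: A streams a running best into a dict and then makes a second dedup pass over results with a seen-set to recover first-appearance order; B groups entries by major.minor into one insertion-ordered dict and reduces each group to its highest version, so the second pass over results and the seen-set disappear.
import Mathlib
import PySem

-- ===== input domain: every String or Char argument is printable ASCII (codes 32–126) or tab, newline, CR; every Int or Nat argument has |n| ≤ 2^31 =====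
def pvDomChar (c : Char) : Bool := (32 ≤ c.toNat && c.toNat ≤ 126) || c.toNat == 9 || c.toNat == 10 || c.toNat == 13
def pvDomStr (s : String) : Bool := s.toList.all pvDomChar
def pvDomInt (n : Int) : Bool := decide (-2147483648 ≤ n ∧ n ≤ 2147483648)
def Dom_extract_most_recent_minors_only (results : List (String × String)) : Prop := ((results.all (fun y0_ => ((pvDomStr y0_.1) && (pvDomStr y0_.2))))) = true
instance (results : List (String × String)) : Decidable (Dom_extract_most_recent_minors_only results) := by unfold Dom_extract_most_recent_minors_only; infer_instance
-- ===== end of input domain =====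

-- B replaces A's stream-compare pass plus a second dedup pass (with a `seen` set) by
-- group-by-major.minor into an insertion-ordered dict followed by a per-group reduction;
-- objective: alternative decomposition, same results.

-- ===== PORT A =====
-- shared helpers (both Pythons use the same `ver.split(".")` / version_key machinery)
-- ver.split("."): sep "." ≠ "", so split? is always `some` — getD [] is exact
def pvParts (v : String) : List String := (PySem.Str.split? v ".").getD []
-- ".".join(parts[:2])
def pvKey (v : String) : String := PySem.Str.join "." (PySem.List.slice (pvParts v) none (some 2))
-- version_key(v): none exactly where Python raises ValueError
def pvVK? (v : String) : Option (List Int) := (pvParts v).mapM PySem.Int.ofStr?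
-- Python tuple-of-int `>` (lexicographic, longer wins on equal prefix)
def pvGtInts : List Int → List Int → Bool
  | _ :: _, [] => true
  | [], _ => false
  | a :: as, b :: bs => if a > b then true else if a < b then false else pvGtInts as bs
-- version_key(x) > version_key(y); the getD [] fallback is only reached where Python raises
-- (outside Pre_), so it is exact on Pre_
def pvBeat (x y : String) : Bool := pvGtInts ((pvVK? x).getD []) ((pvVK? y).getD [])

-- one step of A's first loop over `results`
def pvStepA (d : PySem.Dict String (String × String)) (e : String × String) :
    PySem.Dict String (String × String) :=
  if !(d.contains (pvKey e.1)) || pvBeat e.1 (d.getD (pvKey e.1) ("", "")).1 then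
    d.insert (pvKey e.1) e
  else d

-- one step of A's second loop (ordered, seen); `latest[key]` read with getD (key always present)
def pvStepA2 (latest : PySem.Dict String (String × String))
    (p : List (String × String) × PySem.Set String) (e : String × String) :
    List (String × String) × PySem.Set String :=
  if PySem.Set.contains p.2 (pvKey e.1) then p
  else (p.1 ++ [latest.getD (pvKey e.1) ("", "")], PySem.Set.add p.2 (pvKey e.1))

def extract_most_recent_minors_only (results : List (String × String)) : List (String × String) :=
  let latest := results.foldl pvStepA PySem.Dict.empty
  (results.foldl (pvStepA2 latest) ([], PySem.Set.empty)).1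

-- ===== PORT B =====
-- best = entries[0]; for cand in entries[1:]: … ([] is unreachable: group lists are nonempty)
def pvBest (entries : List (String × String)) : String × String :=
  match entries with
  | [] => ("", "")
  | h :: t => t.foldl (fun best cand => if pvBeat cand.1 best.1 then cand else best) h

def extract_most_recent_minors_only_alt (results : List (String × String)) :
    List (String × String) :=
  let groups := results.foldl (fun g e => g.modify (pvKey e.1) [] (· ++ [e])) PySem.Dict.empty
  groups.values.foldl (fun out entries => out ++ [pvBest entries]) []

-- ===== PRECONDITION & SPEC =====
-- Pre_ excludes exactly the inputs on which the Python A raises ValueError: version_key is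
-- applied (by both programs) precisely to versions whose major.minor key occurs more than once,
-- so every such version must parse as dot-separated ints.
def Pre_extract_most_recent_minors_only (results : List (String × String)) : Prop :=
  ∀ e ∈ results,
    1 < (results.map (fun r => pvKey r.1)).count (pvKey e.1) → (pvVK? e.1).isSome = true
instance (results : List (String × String)) : Decidable (Pre_extract_most_recent_minors_only results) := by
  unfold Pre_extract_most_recent_minors_only; infer_instance

def pvWitness_extract_most_recent_minors_only : (List (String × String)) :=
  [("1.2.3", "2020-01-01"), ("1.2.10", "2021-06-01"), ("2.0", "2022-01-01"), ("1.2.4", "2020-05-01")]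

def Spec_extract_most_recent_minors_only (results : List (String × String)) (out : List (String × String)) : Prop := out = extract_most_recent_minors_only_alt results
instance (results : List (String × String)) (out : List (String × String)) : Decidable (Spec_extract_most_recent_minors_only results out) := by unfold Spec_extract_most_recent_minors_only; infer_instance

-- ===== CLAIM (what is proved, stated in full; the proofs are below) =====
def Claim_equal_extract_most_recent_minors_only : Prop := ∀ (results : List (String × String)), Dom_extract_most_recent_minors_only results → Pre_extract_most_recent_minors_only results → Spec_extract_most_recent_minors_only results (extract_most_recent_minors_only results)

-- ===== LEMMAS AND PROOFS =====

theorem pvWitness_ok :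
    Dom_extract_most_recent_minors_only pvWitness_extract_most_recent_minors_only ∧
    Pre_extract_most_recent_minors_only pvWitness_extract_most_recent_minors_only := by
  constructor <;> decide

-- A's streaming "keep the stored entry unless the newcomer beats it", as a function of the
-- stored optional entry and the remaining entries of one key's group
def pvBestOpt : Option (String × String) → List (String × String) → Option (String × String)
  | o, [] => o
  | none, c :: t => pvBestOpt (some c) t
  | some b, c :: t => pvBestOpt (some (if pvBeat c.1 b.1 then c else b)) t

theorem pvBestOpt_some (b : String × String) (t : List (String × String)) :
    pvBestOpt (some b) t =
      some (t.foldl (fun best cand => if pvBeat cand.1 best.1 then cand else best) b) := by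
  induction t generalizing b with
  | nil => rfl
  | cons c t ih => simp [pvBestOpt, List.foldl, ih]

-- A's first loop computes, at each key, the streaming best of that key's group
theorem pvLatest_get? (l : List (String × String)) (d : PySem.Dict String (String × String))
    (k : String) :
    (l.foldl pvStepA d).get? k = pvBestOpt (d.get? k) (l.filter (fun e => pvKey e.1 == k)) := by
  induction l generalizing d with
  | nil => rfl
  | cons e t ih =>
    simp only [List.foldl_cons, List.filter_cons]
    rw [ih]
    by_cases hk : pvKey e.1 = k
    · subst hk
      simp only [beq_self_eq_true, if_pos]
      unfold pvStepA
      cases hc : d.get? (pvKey e.1) with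
      | none =>
        have hcont : d.contains (pvKey e.1) = false := by
          rw [PySem.Dict.contains_eq_isSome_get?, hc]; rfl
        simp [hcont, PySem.Dict.get?_insert_self, pvBestOpt]
      | some b =>
        have hcont : d.contains (pvKey e.1) = true := by
          rw [PySem.Dict.contains_eq_isSome_get?, hc]; rfl
        have hgd : d.getD (pvKey e.1) ("", "") = b := by
          rw [PySem.Dict.getD_eq_get?_getD, hc]; rfl
        simp only [hcont, hgd, Bool.not_true, Bool.false_or]
        by_cases hb : pvBeat e.1 b.1 = true
        · simp [hb, PySem.Dict.get?_insert_self, pvBestOpt]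
        · simp [Bool.eq_false_iff.mpr hb, hc, pvBestOpt]
    · have hbeq : (pvKey e.1 == k) = false := by simpa using hk
      have hget : (pvStepA d e).get? k = d.get? k := by
        unfold pvStepA
        split
        · exact PySem.Dict.get?_insert_of_ne d e (Ne.symm hk)
        · rfl
      simp [hbeq, hget]

-- the keys of `results`, deduplicated against an already-seen prefix, in first-appearance order
def pvDedupNew : List String → List String → List String
  | _, [] => []
  | seen, k :: ks =>
    if PySem.Set.contains seen k then pvDedupNew seen ks
    else k :: pvDedupNew (seen ++ [k]) ks

-- A's second loop appends latest[k] for each newly seen key, in first-appearance order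
theorem pvPass2_eq (latest : PySem.Dict String (String × String)) (l : List (String × String))
    (acc : List (String × String)) (seen : PySem.Set String) :
    (l.foldl (pvStepA2 latest) (acc, seen)).1 =
      acc ++ (pvDedupNew seen (l.map (fun e => pvKey e.1))).map
        (fun k => latest.getD k ("", "")) := by
  induction l generalizing acc seen with
  | nil => simp [pvDedupNew]
  | cons e t ih =>
    simp only [List.foldl_cons, List.map_cons]
    by_cases hc : PySem.Set.contains seen (pvKey e.1) = true
    · have : pvStepA2 latest (acc, seen) e = (acc, seen) := by
        unfold pvStepA2; rw [if_pos hc]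
      rw [this, ih, pvDedupNew, if_pos hc]
    · have hnm : pvKey e.1 ∉ seen := fun h => hc ((PySem.Set.contains_iff seen _).mpr h)
      have hcf : PySem.Set.contains seen (pvKey e.1) = false := Bool.eq_false_iff.mpr hc
      have : pvStepA2 latest (acc, seen) e =
          (acc ++ [latest.getD (pvKey e.1) ("", "")], PySem.Set.add seen (pvKey e.1)) := by
        unfold pvStepA2; rw [if_neg hc]
      rw [this, ih, pvDedupNew, if_neg hc, PySem.Set.add_of_not_mem hnm]
      simp

-- building a set left to right IS prepending the not-yet-seen keys
theorem pvUpdate_eq_dedupNew (ks : List String) (s : List String) :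
    PySem.Set.update s ks = s ++ pvDedupNew s ks := by
  induction ks generalizing s with
  | nil => simp [PySem.Set.update_nil, pvDedupNew]
  | cons k ks ih =>
    rw [PySem.Set.update_cons, pvDedupNew]
    by_cases hm : k ∈ s
    · rw [PySem.Set.add_of_mem hm, if_pos ((PySem.Set.contains_iff s k).mpr hm), ih]
    · rw [PySem.Set.add_of_not_mem hm,
        if_neg (fun h => hm ((PySem.Set.contains_iff s k).mp h)), ih]
      simp

theorem pvOfList_eq_dedupNew (ks : List String) :
    PySem.Set.ofList ks = pvDedupNew [] ks := by
  rw [← PySem.Set.update_nil_left, pvUpdate_eq_dedupNew]; rfl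

-- B's group dict maps each key to that key's entries, in order
theorem pvGroups_getD (results : List (String × String)) (k : String) :
    ((results.foldl (fun g e => g.modify (pvKey e.1) [] (· ++ [e])) PySem.Dict.empty).getD k [])
      = results.filter (fun e => pvKey e.1 == k) := by
  have h1 : results.foldl (fun g e => g.modify (pvKey e.1) [] (· ++ [e]))
        (PySem.Dict.empty : PySem.Dict String (List (String × String)))
      = (results.map (fun e => (pvKey e.1, e))).foldl
          (fun d p => d.modify p.1 [] (· ++ [p.2])) PySem.Dict.empty := by
    rw [List.foldl_map]
  rw [h1, PySem.Dict.getD_foldl_modify_append, PySem.Dict.getD_empty, List.filter_map]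
  simp [Function.comp_def]

theorem pvGroups_keys (results : List (String × String)) :
    ((results.foldl (fun g e => g.modify (pvKey e.1) [] (· ++ [e])) PySem.Dict.empty).keys : List String)
      = PySem.Set.ofList (results.map (fun e => pvKey e.1)) := by
  rw [PySem.Dict.keys_foldl_modify_key results (fun e => pvKey e.1) []
      (fun _ x => (· ++ [x])) PySem.Dict.empty,
    PySem.Dict.keys_empty, PySem.Set.update_nil_left]

-- B as a map over the first-appearance keys
theorem pvAlt_eq (results : List (String × String)) :
    extract_most_recent_minors_only_alt results =
      (PySem.Set.ofList (results.map (fun e => pvKey e.1))).map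
        (fun k => pvBest (results.filter (fun e => pvKey e.1 == k))) := by
  unfold extract_most_recent_minors_only_alt
  rw [PySem.List.foldl_append_singleton_eq_map,
    PySem.Dict.values_eq_map_keys _ (by rw [pvGroups_keys]; exact PySem.Set.nodup_ofList _) [],
    pvGroups_keys, List.map_map]
  refine List.map_congr_left fun k _ => ?_
  simp [Function.comp, pvGroups_getD]

-- ===== VERDICT (by name: the statement is the Claim_ definition above) =====
theorem extract_most_recent_minors_only_spec : Claim_equal_extract_most_recent_minors_only := by
  intro results _ _
  unfold Spec_extract_most_recent_minors_only
  unfold extract_most_recent_minors_only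
  rw [pvPass2_eq, pvAlt_eq,
    show (PySem.Set.empty : PySem.Set String) = [] from rfl, ← pvOfList_eq_dedupNew]
  simp only [List.nil_append]
  refine List.map_congr_left fun k hk => ?_
  have hk' : k ∈ results.map (fun e => pvKey e.1) := (PySem.Set.mem_ofList _ _).mp hk
  obtain ⟨e, he, hke⟩ := List.mem_map.mp hk'
  have hef : e ∈ results.filter (fun e => pvKey e.1 == k) :=
    List.mem_filter.mpr ⟨he, by simp [hke]⟩
  rw [PySem.Dict.getD_eq_get?_getD, pvLatest_get?, PySem.Dict.get?_empty]
  cases hfe : results.filter (fun e => pvKey e.1 == k) with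
  | nil => rw [hfe] at hef; cases hef
  | cons h t => simp [pvBestOpt, pvBestOpt_some, pvBest]
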